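-- pv_equiv track=rewrite | github.com/MichaelT-W23/ForGuy | python/search_algorithm.py | highlight_string
-- ===== SOURCE A (Python) =====
-- def highlight_string(text, search_string):
--     idx = 0
--     highlighted_text = ''
--     search_length = len(search_string)
--     lower_text = text.lower()
--     lower_search_string = search_string.lower()
--     count = 0
--
--     while idx < len(text):
--         next_find = lower_text.find(lower_search_string, idx)
--         if next_find == -1:
--             highlighted_text += text[idx:]
--             break
--         highlighted_text += text[idx:next_find] + '<span style="background-color: yellow">' + text[next_find:next_find + search_length] + '</span>'
--         idx = next_find + search_length
--         count += 1
--
--     return highlighted_text, count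
-- ===== SOURCE B (Python) =====
-- def highlight_string(text, search_string):
--     lower_text = text.lower()
--     lower_search = search_string.lower()
--     search_length = len(search_string)
--     pieces = []
--     count = 0
--     i = 0
--     n = len(text)
--     while i < n:
--         if search_length > 0 and lower_text[i:i + search_length] == lower_search:
--             pieces.append('<span style="background-color: yellow">')
--             pieces.append(text[i:i + search_length])
--             pieces.append('</span>')
--             count += 1
--             i += search_length
--         else:
--             pieces.append(text[i])
--             i += 1
--     return ''.join(pieces), count
-- ===== Notes on version B (the rewrite author's own statement) =====
-- stated objective: alternative
-- what changed: B replaces A's find-and-jump loop with string concatenation by a single per-position scan that compares the lowercased window at each index and assembles the result from a list of pieces joined at the end.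
import Mathlib
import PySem

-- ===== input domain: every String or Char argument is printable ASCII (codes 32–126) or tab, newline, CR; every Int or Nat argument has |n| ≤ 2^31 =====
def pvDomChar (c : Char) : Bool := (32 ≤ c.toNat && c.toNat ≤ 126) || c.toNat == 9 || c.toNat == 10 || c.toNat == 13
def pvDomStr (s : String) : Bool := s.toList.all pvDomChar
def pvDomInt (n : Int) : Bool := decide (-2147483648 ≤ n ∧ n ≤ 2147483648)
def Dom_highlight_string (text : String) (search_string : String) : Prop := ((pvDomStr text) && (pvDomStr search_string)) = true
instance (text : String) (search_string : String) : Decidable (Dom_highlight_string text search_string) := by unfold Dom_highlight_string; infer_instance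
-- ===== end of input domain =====

-- B assembles the highlighted text by a per-position window scan instead of A's find-and-jump loop; same output, stated as 'alternative'.

def hsOpen : List Char := "<span style=\"background-color: yellow\">".toList
def hsClose : List Char := "</span>".toList

-- ===== PORT A =====
-- while-loop of A: idx advances to next_find + search_length; fuel (length+1) only makes the
-- recursion total — it is exhausted exactly where Python's loop never terminates (outside Pre_).
def hsLoopA (tL lowT lowS : List Char) (L : Nat) :
    Nat → Nat → List Char → Int → List Char × Int
  | 0, _, acc, count => (acc, count)
  | fuel + 1, idx, acc, count =>
    if idx < tL.length then
      let nf := PySem.Chars.findFrom lowT lowS (idx : Int) none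
      if nf = -1 then
        (acc ++ PySem.List.slice tL (some (idx : Int)) none, count)
      else
        hsLoopA tL lowT lowS L fuel (nf.toNat + L)
          (acc ++ PySem.List.slice tL (some (idx : Int)) (some nf) ++ hsOpen
               ++ PySem.List.slice tL (some nf) (some (nf + (L : Int))) ++ hsClose)
          (count + 1)
    else (acc, count)

def highlight_string (text : String) (search_string : String) : String × Int :=
  let r := hsLoopA text.toList (PySem.Chars.lower text.toList)
      (PySem.Chars.lower search_string.toList) search_string.toList.length
      (text.toList.length + 1) 0 [] 0
  (String.ofList r.1, r.2)

-- ===== PORT B =====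
-- B's while-loop: at each index compare the lowercased window; append either span pieces or one char.
def hsLoopB (tL lowT lowS : List Char) (L : Nat) (i : Nat) (acc : List Char) (count : Int) :
    List Char × Int :=
  if h : i < tL.length then
    if 0 < L ∧ PySem.List.slice lowT (some (i : Int)) (some ((i : Int) + (L : Int))) = lowS then
      hsLoopB tL lowT lowS L (i + L)
        (acc ++ hsOpen ++ PySem.List.slice tL (some (i : Int)) (some ((i : Int) + (L : Int))) ++ hsClose)
        (count + 1)
    else
      hsLoopB tL lowT lowS L (i + 1) (acc ++ [tL[i]]) count
  else (acc, count)
termination_by tL.length - i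
decreasing_by
  · rename_i hm; omega
  · omega

def highlight_string_alt (text : String) (search_string : String) : String × Int :=
  let r := hsLoopB text.toList (PySem.Chars.lower text.toList)
      (PySem.Chars.lower search_string.toList) search_string.toList.length 0 [] 0
  (String.ofList r.1, r.2)

-- ===== PRECONDITION & SPEC =====
-- Pre_ excludes nonempty text with an empty search_string: there Python A's loop never advances
-- (next_find = idx, idx += 0) and A diverges, returning nothing to match.
def Pre_highlight_string (text : String) (search_string : String) : Prop :=
  search_string ≠ "" ∨ text = ""
instance (text : String) (search_string : String) : Decidable (Pre_highlight_string text search_string) := by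
  unfold Pre_highlight_string; infer_instance

def pvWitness_highlight_string : String × String := ("xaBcAb", "ab")

def Spec_highlight_string (text : String) (search_string : String) (out : String × Int) : Prop :=
  out = highlight_string_alt text search_string
instance (text : String) (search_string : String) (out : String × Int) : Decidable (Spec_highlight_string text search_string out) := by
  unfold Spec_highlight_string; infer_instance

-- ===== CLAIM (what is proved, stated in full; the proofs are below) =====
def Claim_equal_highlight_string : Prop := ∀ (text : String) (search_string : String), Dom_highlight_string text search_string → Pre_highlight_string text search_string → Spec_highlight_string text search_string (highlight_string text search_string)

-- ===== LEMMAS AND PROOFS =====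

theorem hsB_noMatch (tL lowT lowS : List Char) (L : Nat) (_hlen : lowT.length = tL.length) :
    ∀ n i acc count, tL.length - i ≤ n → ¬ lowS <:+: lowT.drop i →
      hsLoopB tL lowT lowS L i acc count = (acc ++ tL.drop i, count) := by
  intro n
  induction n with
  | zero =>
    intro i acc count hn hinf
    rw [hsLoopB, dif_neg (by omega : ¬ i < tL.length)]
    rw [List.drop_eq_nil_of_le (by omega : tL.length ≤ i)]
    simp
  | succ n ih =>
    intro i acc count hn hinf
    by_cases hi : i < tL.length
    · rw [hsLoopB, dif_pos hi]
      have hcond : ¬ (0 < L ∧ PySem.List.slice lowT (some (i : Int)) (some ((i : Int) + (L : Int))) = lowS) := by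
        rintro ⟨-, hsl⟩
        rw [PySem.List.slice_natCast_add] at hsl
        exact hinf (hsl ▸ (List.take_prefix L (lowT.drop i)).isInfix)
      rw [if_neg hcond]
      have hinf' : ¬ lowS <:+: lowT.drop (i + 1) := by
        intro h
        apply hinf
        have h1 : lowT.drop (i + 1) = (lowT.drop i).drop 1 := by rw [List.drop_drop]
        exact h.trans (h1 ▸ (List.drop_suffix 1 (lowT.drop i)).isInfix)
      rw [ih (i + 1) (acc ++ [tL[i]]) count (by omega) hinf']
      rw [List.append_assoc]
      congr 2
      rw [List.singleton_append, List.getElem_cons_drop]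
    · rw [hsLoopB, dif_neg hi]
      rw [List.drop_eq_nil_of_le (by omega : tL.length ≤ i)]
      simp

theorem hsB_run (tL lowT lowS : List Char) (L : Nat) (_hlen : lowT.length = tL.length) :
    ∀ fn i acc count, i + fn ≤ tL.length →
      (∀ j, i ≤ j → j < i + fn → ¬ lowS <+: lowT.drop j) →
      hsLoopB tL lowT lowS L i acc count
        = hsLoopB tL lowT lowS L (i + fn) (acc ++ (tL.drop i).take fn) count := by
  intro fn
  induction fn with
  | zero => intro i acc count _ _; simp
  | succ fn ih =>
    intro i acc count hle hj
    have hi : i < tL.length := by omega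
    rw [hsLoopB, dif_pos hi]
    have hcond : ¬ (0 < L ∧ PySem.List.slice lowT (some (i : Int)) (some ((i : Int) + (L : Int))) = lowS) := by
      rintro ⟨-, hsl⟩
      rw [PySem.List.slice_natCast_add] at hsl
      exact hj i le_rfl (by omega) (hsl ▸ List.take_prefix L (lowT.drop i))
    rw [if_neg hcond]
    rw [ih (i + 1) (acc ++ [tL[i]]) count (by omega) (fun j h1 h2 => hj j (by omega) (by omega))]
    have hidx : i + 1 + fn = i + (fn + 1) := by omega
    rw [hidx]
    congr 1
    rw [List.append_assoc]
    congr 1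
    have hd : tL.drop i = tL[i] :: tL.drop (i + 1) := (List.getElem_cons_drop hi).symm
    rw [hd, List.take_succ_cons, List.singleton_append]

theorem hsAB (tL lowT lowS : List Char) (L : Nat) (_hlen : lowT.length = tL.length)
    (hLs : lowS.length = L) (hL0 : 0 < L) :
    ∀ fuel idx acc count, tL.length - idx < fuel →
      hsLoopA tL lowT lowS L fuel idx acc count = hsLoopB tL lowT lowS L idx acc count := by
  intro fuel
  induction fuel with
  | zero => intro idx acc count h; omega
  | succ fuel ih =>
    intro idx acc count hfuel
    by_cases hidx : idx < tL.length
    · rw [hsLoopA, if_pos hidx]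
      rw [PySem.Chars.findFrom_natCast lowT lowS idx (by omega)]
      by_cases hf : PySem.Chars.find (lowT.drop idx) lowS = -1
      · rw [if_pos hf, if_pos rfl]
        rw [hsB_noMatch tL lowT lowS L _hlen (tL.length - idx) idx acc count le_rfl
          ((PySem.Chars.find_eq_neg_one_iff (lowT.drop idx) lowS).mp hf)]
        rw [PySem.List.slice_from_natCast]
      · rw [if_neg hf]
        have hf0 : (0:Int) ≤ PySem.Chars.find (lowT.drop idx) lowS := by
          have := PySem.Chars.neg_one_le_find (lowT.drop idx) lowS; omega
        obtain ⟨hpre0, hmin⟩ := PySem.Chars.find_spec hf0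
        set fn := (PySem.Chars.find (lowT.drop idx) lowS).toNat with hfndef
        have hfnc : ((fn : Nat) : Int) = PySem.Chars.find (lowT.drop idx) lowS :=
          Int.toNat_of_nonneg hf0
        have hpre : lowS <+: lowT.drop (idx + fn) := by
          have h1 : lowT.drop (idx + fn) = (lowT.drop idx).drop fn := by
            rw [List.drop_drop]
          rw [h1]; exact hpre0
        have hlenle : idx + fn + L ≤ tL.length := by
          have h2 := hpre.length_le
          rw [List.length_drop, hLs, _hlen] at h2
          by_cases h3 : idx + fn ≤ tL.length
          · omega
          · rw [List.drop_eq_nil_of_le (by omega : lowT.length ≤ idx + fn)] at hpre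
            have := hpre.length_le
            simp [hLs] at this
            omega
        rw [if_neg (by omega : ¬ ((idx:Int) + PySem.Chars.find (lowT.drop idx) lowS = -1))]
        have h1 : ((idx:Int) + PySem.Chars.find (lowT.drop idx) lowS).toNat = idx + fn := by omega
        have h2 : (idx:Int) + PySem.Chars.find (lowT.drop idx) lowS = ((idx + fn : Nat) : Int) := by
          push_cast; omega
        rw [h1, h2]
        have hnom : ∀ j, idx ≤ j → j < idx + fn → ¬ lowS <+: lowT.drop j := by
          intro j hj1 hj2 hp
          have h3 : lowT.drop j = (lowT.drop idx).drop (j - idx) := by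
            rw [List.drop_drop]
            congr 1
            omega
          exact hmin (j - idx) (by omega) (h3 ▸ hp)
        have hslice : PySem.List.slice lowT (some ((idx + fn : Nat) : Int))
            (some (((idx + fn : Nat) : Int) + (L : Int))) = lowS := by
          rw [PySem.List.slice_natCast_add]
          have := List.prefix_iff_eq_take.mp hpre
          rw [hLs] at this
          exact this.symm
        rw [hsB_run tL lowT lowS L _hlen fn idx acc count (by omega) hnom]
        rw [hsLoopB, dif_pos (by omega : idx + fn < tL.length), if_pos ⟨hL0, hslice⟩]
        rw [ih (idx + fn + L) _ (count + 1) (by omega)]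
        congr 1
        rw [PySem.List.slice_natCast]
        simp [List.append_assoc]
    · rw [hsLoopA, if_neg hidx, hsLoopB, dif_neg hidx]

-- ===== VERDICT (by name: the statement is the Claim_ definition above) =====
theorem highlight_string_spec : Claim_equal_highlight_string := by
  intro text search_string _ hpre
  unfold Spec_highlight_string
  by_cases hs : search_string = ""
  · have ht : text = "" := by
      rcases hpre with h | h
      · exact absurd hs h
      · exact h
    subst hs; subst ht
    simp only [highlight_string, highlight_string_alt]
    rw [hsLoopB]
    simp [hsLoopA]
  · have hL0 : 0 < search_string.toList.length := by
      cases h : search_string.toList with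
      | nil => exact absurd (by simp_all) hs
      | cons a l => simp
    have key := hsAB text.toList (PySem.Chars.lower text.toList)
      (PySem.Chars.lower search_string.toList) search_string.toList.length
      (by simp [PySem.Chars.lower]) (by simp [PySem.Chars.lower]) hL0
      (text.toList.length + 1) 0 [] 0 (by omega)
    simp only [highlight_string, highlight_string_alt]
    rw [key]
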